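-- pv_equiv track=rewrite | github.com/drael05/Recuperatorio-primer-parcial | funciones.py | encontrar_apellido
-- ===== SOURCE A (Python) =====
-- def encontrar_apellido (cadena:str)-> str:
--     cadena_copia = ""
--     bandera_espacio = False
--     if len(cadena) > 0:
--         for i in range (len(cadena)):
--             valor_a_comparar = ord(cadena[i])
--             if valor_a_comparar == 32:
--                 bandera_espacio = True
--             elif bandera_espacio == True:
--                 cadena_copia += cadena[i]
--     return cadena_copia
-- ===== SOURCE B (Python) =====
-- def encontrar_apellido(cadena: str) -> str:
--     idx = cadena.find(' ')
--     if idx == -1: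
--         return ""
--     return ''.join(c for c in cadena[idx + 1:] if c != ' ')
-- ===== Notes on version B (the rewrite author's own statement) =====
-- stated objective: faster
-- what changed: Replaces A's boolean state-machine character loop (with string += accumulation) with locate-the-first-space via str.find and a filtering join over the suffix.
import Mathlib
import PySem

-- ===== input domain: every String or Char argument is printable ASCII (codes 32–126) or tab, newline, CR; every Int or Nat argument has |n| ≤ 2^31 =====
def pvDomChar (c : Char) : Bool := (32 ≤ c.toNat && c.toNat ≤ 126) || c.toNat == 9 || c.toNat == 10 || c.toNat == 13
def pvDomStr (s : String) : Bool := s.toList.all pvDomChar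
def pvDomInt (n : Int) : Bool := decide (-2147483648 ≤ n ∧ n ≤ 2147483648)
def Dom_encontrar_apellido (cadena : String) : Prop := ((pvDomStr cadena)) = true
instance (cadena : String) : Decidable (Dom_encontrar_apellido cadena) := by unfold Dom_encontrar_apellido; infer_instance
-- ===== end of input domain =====

-- B replaces A's boolean state-machine character loop with find-first-space then filter the suffix (measured faster by constant factor).
-- ===== PORT A =====
-- A: flag-based single pass; cadena_copia accumulates, bandera_espacio flips at the first space.
def encontrar_apellidoStep (st : List Char × Bool) (c : Char) : List Char × Bool :=
  let valor_a_comparar := c.toNat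
  if valor_a_comparar == 32 then (st.1, true)
  else if st.2 == true then (st.1 ++ [c], st.2)
  else st

def encontrar_apellido (cadena : String) : String :=
  if cadena.toList.length > 0 then
    String.ofList (cadena.toList.foldl encontrar_apellidoStep ([], false)).1
  else String.ofList []

-- ===== PORT B =====
def encontrar_apellido_alt (cadena : String) : String :=
  let idx := PySem.Str.find cadena " "
  if idx == -1 then ""
  else String.ofList ((PySem.List.slice cadena.toList (some (idx + 1)) none).filter (fun c => c != ' '))

-- ===== PRECONDITION & SPEC =====
def Spec_encontrar_apellido (cadena : String) (out : String) : Prop := out = encontrar_apellido_alt cadena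
instance (cadena : String) (out : String) : Decidable (Spec_encontrar_apellido cadena out) := by unfold Spec_encontrar_apellido; infer_instance

-- ===== CLAIM (what is proved, stated in full; the proofs are below) =====
def Claim_equal_encontrar_apellido : Prop := ∀ (cadena : String), Dom_encontrar_apellido cadena → Spec_encontrar_apellido cadena (encontrar_apellido cadena)

-- ===== LEMMAS AND PROOFS =====
-- A's loop result once the flag is set: the remaining non-space characters.
lemma toNat_ne_32 {c : Char} (h : c ≠ ' ') : c.toNat ≠ 32 := fun hn => h (by
  have h1 := Char.ofNat_toNat c
  rw [hn] at h1
  rw [← h1])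

lemma foldA_true (l : List Char) (acc : List Char) :
    (l.foldl encontrar_apellidoStep (acc, true)).1 = acc ++ l.filter (fun c => c != ' ') := by
  induction l generalizing acc with
  | nil => simp
  | cons c t ih =>
    by_cases h : c = ' '
    · subst h; simp [List.foldl, encontrar_apellidoStep, ih]
    · have hc : c.toNat ≠ 32 := toNat_ne_32 h
      simp [List.foldl, encontrar_apellidoStep, hc, h, ih]

-- the value after the first space, spaces removed (characterizes A before the flag is set)
def afterSpace : List Char → List Char
  | [] => []
  | c :: t => if c = ' ' then t.filter (fun c => c != ' ') else afterSpace t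

lemma foldA_false (l : List Char) (acc : List Char) :
    (l.foldl encontrar_apellidoStep (acc, false)).1 = acc ++ afterSpace l := by
  induction l generalizing acc with
  | nil => simp [afterSpace]
  | cons c t ih =>
    by_cases h : c = ' '
    · subst h; simp [List.foldl, encontrar_apellidoStep, afterSpace, foldA_true]
    · have hc : c.toNat ≠ 32 := toNat_ne_32 h
      simp [List.foldl, encontrar_apellidoStep, hc, afterSpace, h, ih]

lemma afterSpace_of_no_space (l : List Char) (h : ' ' ∉ l) : afterSpace l = [] := by
  induction l with
  | nil => rfl
  | cons c t ih =>
    simp only [List.mem_cons, not_or] at h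
    simp [afterSpace, Ne.symm h.1, ih h.2]

lemma afterSpace_of_first (l : List Char) (k : Nat)
    (hk : [' '] <+: l.drop k) (hmin : ∀ i, i < k → ¬ [' '] <+: l.drop i) :
    afterSpace l = (l.drop (k + 1)).filter (fun c => c != ' ') := by
  induction l generalizing k with
  | nil => simp at hk
  | cons c t ih =>
    cases k with
    | zero =>
      simp only [List.drop_zero] at hk
      obtain ⟨r, hr⟩ := hk
      cases hr
      simp [afterSpace]
    | succ k =>
      have hc : c ≠ ' ' := by
        intro h; subst h
        exact hmin 0 (Nat.succ_pos _) ⟨t, by simp⟩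
      simp only [afterSpace, if_neg hc, List.drop_succ_cons]
      exact ih k hk (fun i hi => by simpa using hmin (i+1) (Nat.succ_lt_succ hi))

-- ===== VERDICT (by name: the statement is the Claim_ definition above) =====
lemma singleton_infix {α : Type} (a : α) (l : List α) : [a] <:+: l ↔ a ∈ l := by
  constructor
  · intro h; exact h.sublist.subset (by simp)
  · intro h
    obtain ⟨s, t, rfl⟩ := List.append_of_mem h
    exact ⟨s, t, by simp⟩

lemma portA_eq_afterSpace (cadena : String) :
    encontrar_apellido cadena = String.ofList (afterSpace cadena.toList) := by
  unfold encontrar_apellido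
  split_ifs with h
  · rw [foldA_false]; simp
  · have hnil : cadena.toList = [] := List.eq_nil_of_length_eq_zero (by omega)
    rw [hnil]; rfl

theorem encontrar_apellido_spec : Claim_equal_encontrar_apellido := by
  intro cadena _
  unfold Spec_encontrar_apellido encontrar_apellido_alt
  rw [portA_eq_afterSpace]
  simp only [PySem.Str.find_eq]
  have htl : (" " : String).toList = [' '] := rfl
  rw [htl]
  by_cases hmem : ' ' ∈ cadena.toList
  · have hfind : PySem.Chars.find cadena.toList [' '] ≠ -1 :=
      (PySem.Chars.find_ne_neg_one_iff _ _).mpr ((singleton_infix _ _).mpr hmem)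
    have hnn : 0 ≤ PySem.Chars.find cadena.toList [' '] :=
      (PySem.Chars.find_nonneg_iff _ _).mpr ((singleton_infix _ _).mpr hmem)
    obtain ⟨hpre, hmin⟩ := PySem.Chars.find_spec (s := cadena.toList) (sub := [' ']) hnn
    rw [if_neg (by simpa using hfind)]
    have h0 : (0:Int) ≤ PySem.Chars.find cadena.toList [' '] + 1 := by omega
    rw [PySem.List.slice_from _ h0]
    have h1 : (PySem.Chars.find cadena.toList [' '] + 1).toNat
        = (PySem.Chars.find cadena.toList [' ']).toNat + 1 := by omega
    rw [h1, afterSpace_of_first cadena.toList (PySem.Chars.find cadena.toList [' ']).toNat hpre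
      (fun i hi => hmin i hi)]
  · have hfind : PySem.Chars.find cadena.toList [' '] = -1 :=
      (PySem.Chars.find_eq_neg_one_iff _ _).mpr (fun hinf => hmem ((singleton_infix _ _).mp hinf))
    rw [if_pos (by simp [hfind])]
    rw [afterSpace_of_no_space _ hmem]
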